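-- pv_equiv track=rewrite | github.com/pypi-data/pypi-mirror-377 | packages/sfu-torch-lib/sfu_torch_lib-0.0.59.tar.gz/sfu_torch_lib-0.0.59/sfu_torch_lib/tree.py | select_tree
-- ===== SOURCE A (Python) =====
-- from typing import Sequence
--
-- def select_tree(tree, mask):
--     tree_copy = []
--
--     forward_stack = [(tree, mask, tree_copy)]
--     backward_stack = []
--
--     while forward_stack:
--         source_node, mask_node, destination_node = forward_stack.pop()
--
--         for source_child, mask_child in zip(source_node, mask_node):
--             if isinstance(source_child, Sequence):
--                 new_node = []
--                 forward_stack.append((source_child, mask_child, new_node))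
--                 backward_stack.append((new_node, destination_node))
--             elif mask_child:
--                 backward_stack.append((source_child, destination_node))
--
--     while backward_stack:
--         child, parent = backward_stack.pop()
--
--         if child:
--             parent.insert(0, child)
--
--     return tree_copy
-- ===== SOURCE B (Python) =====
-- from typing import Sequence
--
-- def select_tree(tree, mask):
--     def helper(source_node, mask_node):
--         result = []
--         for source_child, mask_child in zip(source_node, mask_node):
--             if isinstance(source_child, Sequence):
--                 sub = helper(source_child, mask_child)
--                 if sub:
--                     result.append(sub)
--             elif mask_child and source_child:
--                 result.append(source_child)
--         return result
--     return helper(tree, mask)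
-- ===== Notes on version B (the rewrite author's own statement) =====
-- stated objective: simpler
-- what changed: Replaced the iterative forward/backward stack machinery with in-place node mutation by a direct recursive helper that zips each node with its mask and builds the filtered copy in one depth-first pass.
import Mathlib
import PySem

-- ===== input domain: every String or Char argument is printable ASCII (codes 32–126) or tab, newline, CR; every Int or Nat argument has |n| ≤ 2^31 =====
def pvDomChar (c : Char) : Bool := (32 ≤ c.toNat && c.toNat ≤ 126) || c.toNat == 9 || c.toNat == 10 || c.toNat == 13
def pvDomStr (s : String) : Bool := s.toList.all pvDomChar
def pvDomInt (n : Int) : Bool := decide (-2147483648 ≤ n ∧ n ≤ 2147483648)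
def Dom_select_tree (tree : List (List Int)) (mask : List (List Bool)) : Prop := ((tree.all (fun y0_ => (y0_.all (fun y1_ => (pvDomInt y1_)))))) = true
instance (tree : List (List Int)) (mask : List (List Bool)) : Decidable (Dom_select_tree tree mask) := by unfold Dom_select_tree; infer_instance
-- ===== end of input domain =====

-- B replaces A's two explicit stacks and in-place node mutation by a direct
-- recursive zip-and-filter pass (objective: simpler/idiomatic; same output).

-- ===== PORT A =====
-- A mutates freshly allocated list objects through aliases held on both stacks;
-- the port models those heap objects explicitly: each `new_node = []` gets a fresh
-- Nat id and the heap is a function `Nat → List Int` (all ids start as []).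
-- Backward-stack entries: a leaf value destined for node `id`, or a node `id`
-- destined for the root copy (at this type, depth is exactly 2).
inductive BEntry where
  | leaf : Int → Nat → BEntry
  | node : Nat → BEntry

def pvUpd (h : Nat → List Int) (i : Nat) (v : List Int) : Nat → List Int :=
  fun j => if j = i then v else h j

-- the `while forward_stack` loop after its first iteration: every remaining entry
-- is (source_child list, mask list, destination id); the inner `for` pushes
-- leaf entries for mask-selected children (append = cons, head of the list = top)
def forwardLoop : List (List Int × List Bool × Nat) → List BEntry → List BEntry
  | [], bs => bs
  | (s, m, id) :: fs, bs =>
      forwardLoop fs ((s.zip m).foldl (fun b cm => if cm.2 then BEntry.leaf cm.1 id :: b else b) bs)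

-- the `while backward_stack` loop: pop (head) first; `if child` is ≠ 0 for a leaf
-- int and ≠ [] for a node's list; `insert(0, child)` = cons
def backwardLoop : List BEntry → List (List Int) × (Nat → List Int) → List (List Int) × (Nat → List Int)
  | [], st => st
  | BEntry.leaf x id :: bs, (root, heap) =>
      backwardLoop bs (root, if x ≠ 0 then pvUpd heap id (x :: heap id) else heap)
  | BEntry.node id :: bs, (root, heap) =>
      backwardLoop bs ((if heap id ≠ [] then heap id :: root else root), heap)

def select_tree (tree : List (List Int)) (mask : List (List Bool)) : List (List Int) :=
  -- first forward iteration pops (tree, mask, tree_copy): every source_child here is a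
  -- Sequence, so it allocates a fresh node id and pushes onto both stacks
  let init := (tree.zip mask).foldl
    (fun (acc : List (List Int × List Bool × Nat) × List BEntry × Nat) sm =>
      ((sm.1, sm.2, acc.2.2) :: acc.1, BEntry.node acc.2.2 :: acc.2.1, acc.2.2 + 1))
    ([], [], 0)
  let bs := forwardLoop init.1 init.2.1
  (backwardLoop bs ([], fun _ => [])).1

-- ===== PORT B =====
-- leaf level of B's helper: children are ints
def altLeaf : List (Int × Bool) → List Int
  | [] => []
  | (x, m) :: rest => if m ∧ x ≠ 0 then x :: altLeaf rest else altLeaf rest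

-- top level of B's helper: children are Sequences, recurse and keep non-empty results
def altTop : List (List Int × List Bool) → List (List Int)
  | [] => []
  | (s, m) :: rest =>
      let sub := altLeaf (s.zip m)
      if sub ≠ [] then sub :: altTop rest else altTop rest

def select_tree_alt (tree : List (List Int)) (mask : List (List Bool)) : List (List Int) :=
  altTop (tree.zip mask)

-- ===== PRECONDITION & SPEC =====
def Spec_select_tree (tree : List (List Int)) (mask : List (List Bool)) (out : List (List Int)) : Prop := out = select_tree_alt tree mask
instance (tree : List (List Int)) (mask : List (List Bool)) (out : List (List Int)) : Decidable (Spec_select_tree tree mask out) := by unfold Spec_select_tree; infer_instance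

-- ===== CLAIM (what is proved, stated in full; the proofs are below) =====
def Claim_equal_select_tree : Prop := ∀ (tree : List (List Int)) (mask : List (List Bool)), Dom_select_tree tree mask → Spec_select_tree tree mask (select_tree tree mask)

-- ===== LEMMAS AND PROOFS =====

-- proof-side closed forms of the stacks left by the first forward iteration
def fsOf : List (List Int × List Bool) → Nat → List (List Int × List Bool × Nat)
  | [], _ => []
  | (s, m) :: ps, k => fsOf ps (k + 1) ++ [(s, m, k)]

def bsOf : List (List Int × List Bool) → Nat → List BEntry
  | [], _ => []
  | _ :: ps, k => bsOf ps (k + 1) ++ [BEntry.node k]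

-- leaf entries pushed for one node, topmost first
def batch (s : List Int) (m : List Bool) (k : Nat) : List BEntry :=
  (s.zip m).foldl (fun b cm => if cm.2 then BEntry.leaf cm.1 k :: b else b) []

def batches : List (List Int × List Bool) → Nat → List BEntry
  | [], _ => []
  | (s, m) :: ps, k => batch s m k ++ batches ps (k + 1)

theorem init_eq (ps : List (List Int × List Bool)) :
    ∀ fs bs k, ps.foldl
      (fun (acc : List (List Int × List Bool × Nat) × List BEntry × Nat) sm =>
        ((sm.1, sm.2, acc.2.2) :: acc.1, BEntry.node acc.2.2 :: acc.2.1, acc.2.2 + 1))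
      (fs, bs, k)
    = (fsOf ps k ++ fs, bsOf ps k ++ bs, k + ps.length) := by
  induction ps with
  | nil => intro fs bs k; simp [fsOf, bsOf]
  | cons p ps ih =>
      intro fs bs k
      cases p with
      | mk s m =>
          simp only [List.foldl_cons, ih, fsOf, bsOf, List.length_cons, Prod.mk.injEq]
          refine ⟨by simp, by simp, by omega⟩

theorem pushFold_eq (k : Nat) (l : List (Int × Bool)) :
    ∀ bs, l.foldl (fun b cm => if cm.2 then BEntry.leaf cm.1 k :: b else b) bs
      = l.foldl (fun b cm => if cm.2 then BEntry.leaf cm.1 k :: b else b) [] ++ bs := by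
  induction l with
  | nil => intro bs; simp
  | cons a l ih =>
      intro bs
      simp only [List.foldl_cons]
      rw [ih, ih (if a.2 then [BEntry.leaf a.1 k] else [])]
      by_cases h : a.2 = true <;> simp [h]

theorem forwardLoop_append (l1 l2 : List (List Int × List Bool × Nat)) :
    ∀ bs, forwardLoop (l1 ++ l2) bs = forwardLoop l2 (forwardLoop l1 bs) := by
  induction l1 with
  | nil => intro bs; simp [forwardLoop]
  | cons a l ih => intro bs; cases a with | mk s r => cases r with | mk m id =>
      simp [forwardLoop, ih]

theorem forwardLoop_fsOf (ps : List (List Int × List Bool)) :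
    ∀ k bs, forwardLoop (fsOf ps k) bs = batches ps k ++ bs := by
  induction ps with
  | nil => intro k bs; simp [fsOf, batches, forwardLoop]
  | cons p ps ih =>
      intro k bs
      cases p with
      | mk s m =>
          simp only [fsOf, batches, forwardLoop_append, ih, forwardLoop]
          rw [pushFold_eq]
          simp [batch]

theorem backwardLoop_append (l1 l2 : List BEntry) :
    ∀ st, backwardLoop (l1 ++ l2) st = backwardLoop l2 (backwardLoop l1 st) := by
  induction l1 with
  | nil => intro st; simp [backwardLoop]
  | cons a l ih =>
      intro st
      cases st with
      | mk root heap =>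
          cases a <;> simp [backwardLoop, ih]

theorem pvUpd_self (h : Nat → List Int) (k : Nat) (v : List Int) : pvUpd h k v k = v := by
  simp [pvUpd]

theorem pvUpd_ne (h : Nat → List Int) (k j : Nat) (v : List Int) (hj : j ≠ k) : pvUpd h k v j = h j := by
  simp [pvUpd, hj]

theorem pvUpd_same (h : Nat → List Int) (k : Nat) : pvUpd h k (h k) = h := by
  funext j; by_cases hj : j = k <;> simp [pvUpd, hj]

theorem pvUpd_collapse (h : Nat → List Int) (k : Nat) (v w : List Int) :
    pvUpd (pvUpd h k v) k w = pvUpd h k w := by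
  funext j; by_cases hj : j = k <;> simp [pvUpd, hj]

-- processing the leaf entries of one batch conses the kept children, in order,
-- onto heap k, and touches nothing else
theorem backwardLoop_batch (k : Nat) (l : List (Int × Bool)) :
    ∀ root heap, backwardLoop (l.foldl (fun b cm => if cm.2 then BEntry.leaf cm.1 k :: b else b) []) (root, heap)
      = (root, pvUpd heap k (altLeaf l ++ heap k)) := by
  induction l with
  | nil =>
      intro root heap
      simp [backwardLoop, altLeaf, pvUpd_same]
  | cons a l ih =>
      intro root heap
      simp only [List.foldl_cons]
      rw [pushFold_eq]
      rw [backwardLoop_append, ih]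
      by_cases hm : a.2 = true
      · by_cases hx : a.1 = 0
        · simp [hm, hx, backwardLoop, altLeaf]
        · simp [hm, hx, backwardLoop, altLeaf, pvUpd_self, pvUpd_collapse]
      · simp [hm, backwardLoop, altLeaf]

theorem main_lemma (ps : List (List Int × List Bool)) :
    ∀ k root heap, (∀ j, k ≤ j → heap j = []) →
      (backwardLoop (batches ps k ++ bsOf ps k) (root, heap)).1 = altTop ps ++ root
      ∧ ∀ j, j < k → (backwardLoop (batches ps k ++ bsOf ps k) (root, heap)).2 j = heap j := by
  induction ps with
  | nil =>
      intro k root heap _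
      simp [batches, bsOf, backwardLoop, altTop]
  | cons p ps ih =>
      intro k root heap hheap
      cases p with
      | mk s m =>
          have hb : batches ((s, m) :: ps) k ++ bsOf ((s, m) :: ps) k
              = batch s m k ++ ((batches ps (k + 1) ++ bsOf ps (k + 1)) ++ [BEntry.node k]) := by
            simp [batches, bsOf, List.append_assoc]
          rw [hb, backwardLoop_append]
          have h1 : backwardLoop (batch s m k) (root, heap)
              = (root, pvUpd heap k (altLeaf (s.zip m))) := by
            rw [batch, backwardLoop_batch, hheap k le_rfl, List.append_nil]
          rw [h1, backwardLoop_append]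
          have hheap1 : ∀ j, k + 1 ≤ j → pvUpd heap k (altLeaf (s.zip m)) j = [] := by
            intro j hj
            rw [pvUpd_ne _ _ _ _ (by omega)]
            exact hheap j (by omega)
          obtain ⟨ih1, ih2⟩ := ih (k + 1) root (pvUpd heap k (altLeaf (s.zip m))) hheap1
          set st := backwardLoop (batches ps (k + 1) ++ bsOf ps (k + 1))
            (root, pvUpd heap k (altLeaf (s.zip m))) with hst
          have hstk : st.2 k = altLeaf (s.zip m) := by
            rw [ih2 k (by omega), pvUpd_self]
          have hpair : st = (st.1, st.2) := rfl
          rw [hpair]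
          simp only [backwardLoop]
          constructor
          · rw [hstk, ih1, altTop]
            by_cases hne : altLeaf (s.zip m) = [] <;> simp [hne]
          · intro j hj
            rw [ih2 j (by omega), pvUpd_ne _ _ _ _ (by omega)]

theorem select_tree_eq (tree : List (List Int)) (mask : List (List Bool)) :
    select_tree tree mask = select_tree_alt tree mask := by
  unfold select_tree select_tree_alt
  rw [init_eq]
  simp only [List.append_nil]
  rw [forwardLoop_fsOf]
  have h := main_lemma (tree.zip mask) 0 [] (fun _ => []) (fun _ _ => rfl)
  rw [h.1, List.append_nil]

-- ===== VERDICT (by name: the statement is the Claim_ definition above) =====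
theorem select_tree_spec : Claim_equal_select_tree := by
  intro tree mask _
  unfold Spec_select_tree
  exact select_tree_eq tree mask
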